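-- pv_equiv track=rewrite | github.com/ChicIceCream/200-Projects-Extravaganza- | 50 Days of Python Challenge/Day 8.py | odd_even2
-- ===== SOURCE A (Python) =====
-- def odd_even2(list):
--     for num in list:
--         if num % 2 == 0:
--             even = num
--
--     for num in list:
--         if num % 2 != 0:
--             odd = num
--             break
--
--     return even, odd
-- ===== SOURCE B (Python) =====
-- def odd_even2(list):
--     found_odd = False
--     for num in list:
--         if num % 2 == 0:
--             even = num
--         elif not found_odd:
--             odd = num
--             found_odd = True
--     return even, odd
-- ===== Notes on version B (the rewrite author's own statement) =====
-- stated objective: simpler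
-- what changed: Replaces A's two sequential passes (last-even scan, then first-odd scan with break) by a single pass maintaining both the running last-even and a found-odd flag; Pre_ excludes lists lacking an even or an odd element, where both A and B raise UnboundLocalError.
import Mathlib
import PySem

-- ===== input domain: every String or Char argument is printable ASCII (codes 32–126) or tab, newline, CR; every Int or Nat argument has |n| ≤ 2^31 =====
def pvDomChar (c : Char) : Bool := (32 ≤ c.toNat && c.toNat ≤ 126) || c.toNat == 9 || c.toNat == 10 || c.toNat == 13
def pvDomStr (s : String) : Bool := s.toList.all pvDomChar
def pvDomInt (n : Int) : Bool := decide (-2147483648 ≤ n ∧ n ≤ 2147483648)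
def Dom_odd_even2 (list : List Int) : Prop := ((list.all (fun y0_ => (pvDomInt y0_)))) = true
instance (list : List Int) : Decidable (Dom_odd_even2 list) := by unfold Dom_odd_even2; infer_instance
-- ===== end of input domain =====

-- B replaces A's two sequential passes by a single pass with a found-odd flag (simpler decomposition, same O(n) cost).


-- ===== PORT A =====
-- first loop: `even` overwritten by every even element (none = unbound)
def pvLastEven (list : List Int) : Option Int :=
  list.foldl (fun acc num => if PySem.Int.mod num 2 = 0 then some num else acc) none

-- second loop: break at the first odd element (none = unbound)
def pvFirstOdd : List Int → Option Int
  | [] => none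
  | num :: rest => if PySem.Int.mod num 2 ≠ 0 then some num else pvFirstOdd rest

-- Python raises UnboundLocalError when either variable is unbound; Pre_ excludes that, (0,0) is a placeholder.
def odd_even2 (list : List Int) : Int × Int :=
  match pvLastEven list, pvFirstOdd list with
  | some e, some o => (e, o)
  | _, _ => (0, 0)

-- ===== PORT B =====
-- single pass: state = (even : Option Int, odd : Option Int); odd.isSome plays the found_odd flag
def pvStep (st : Option Int × Option Int) (num : Int) : Option Int × Option Int :=
  if PySem.Int.mod num 2 = 0 then (some num, st.2)
  else if st.2.isNone then (st.1, some num) else st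

def pvFinish (st : Option Int × Option Int) : Int × Int :=
  match st.1 with
  | none => (0, 0)
  | some e =>
    match st.2 with
    | none => (0, 0)
    | some o => (e, o)

def odd_even2_alt (list : List Int) : Int × Int :=
  pvFinish (list.foldl pvStep (none, none))

-- ===== PRECONDITION & SPEC =====
-- Pre_ excludes lists lacking an even or lacking an odd element: there Python A (and B) raises UnboundLocalError.
def Pre_odd_even2 (list : List Int) : Prop :=
  (∃ x ∈ list, PySem.Int.mod x 2 = 0) ∧ (∃ x ∈ list, PySem.Int.mod x 2 ≠ 0)
instance (list : List Int) : Decidable (Pre_odd_even2 list) := by unfold Pre_odd_even2; infer_instance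
def pvWitness_odd_even2 : List Int := [2, 3]

def Spec_odd_even2 (list : List Int) (out : Int × Int) : Prop := out = odd_even2_alt list
instance (list : List Int) (out : Int × Int) : Decidable (Spec_odd_even2 list out) := by unfold Spec_odd_even2; infer_instance

-- ===== CLAIM (what is proved, stated in full; the proofs are below) =====
def Claim_equal_odd_even2 : Prop := ∀ (list : List Int), Dom_odd_even2 list → Pre_odd_even2 list → Spec_odd_even2 list (odd_even2 list)

-- ===== LEMMAS AND PROOFS =====
theorem pvStep_fst (l : List Int) (e o : Option Int) :
    (l.foldl pvStep (e, o)).1 = l.foldl (fun acc num => if PySem.Int.mod num 2 = 0 then some num else acc) e := by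
  induction l generalizing e o with
  | nil => rfl
  | cons n t ih =>
      simp only [List.foldl, pvStep]
      by_cases h : PySem.Int.mod n 2 = 0
      · rw [if_pos h, if_pos h]; exact ih _ _
      · rw [if_neg h, if_neg h]
        cases o with
        | none => rw [if_pos (by rfl)]; exact ih _ _
        | some b => rw [if_neg (by simp)]; exact ih _ _

theorem pvStep_snd (l : List Int) (e o : Option Int) :
    (l.foldl pvStep (e, o)).2 = (match o with | some b => some b | none => pvFirstOdd l) := by
  induction l generalizing e o with
  | nil => cases o <;> rfl
  | cons n t ih =>
      simp only [List.foldl, pvStep, pvFirstOdd]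
      by_cases h : PySem.Int.mod n 2 = 0
      · rw [if_pos h, if_neg (not_not_intro h), ih]
      · rw [if_neg h, if_pos h]
        cases o with
        | none => rw [if_pos (by rfl), ih]
        | some b => rw [if_neg (by simp), ih]

-- ===== VERDICT (by name: the statement is the Claim_ definition above) =====
theorem odd_even2_spec : Claim_equal_odd_even2 := by
  intro list _ _
  unfold Spec_odd_even2 odd_even2 odd_even2_alt
  have h : list.foldl pvStep (none, none) = (pvLastEven list, pvFirstOdd list) :=
    Prod.ext (pvStep_fst list none none) (pvStep_snd list none none)
  rw [h]
  cases pvLastEven list <;> cases pvFirstOdd list <;> rfl
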